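-- pv_equiv track=rewrite | github.com/willuhmjs/irremote-gpt | prep_data.py | normalize_button
-- ===== SOURCE A (Python) =====
-- def normalize_button(name):
--     n = name.strip().lower()
--
--     # Power
--     if n in ['power', 'pwr', 'power button']: return '[BTN_POWER]'
--
--     # Volume
--     if n in ['vol+', 'volume up', 'vol_up']: return '[BTN_VOL_UP]'
--     if n in ['vol-', 'volume down', 'vol_dn']: return '[BTN_VOL_DOWN]'
--     if n == 'mute': return '[BTN_MUTE]'
--
--     # Channel
--     if n in ['ch+', 'channel up']: return '[BTN_CH_UP]'
--     if n in ['ch-', 'channel down']: return '[BTN_CH_DOWN]'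
--
--     # Navigation / Menu
--     if n == 'menu': return '[BTN_MENU]'
--     if n == 'enter': return '[BTN_ENTER]'
--     if n == 'back': return '[BTN_BACK]'
--
--     # Digits
--     if n in [str(i) for i in range(10)]: return f'[BTN_{n}]'
--
--     return None
-- ===== SOURCE B (Python) =====
-- # Sorted alias table + recursive binary search, instead of A's sequential if-chain.
-- # Keys are in ascending ASCII (code-point) order, digits included.
-- _TABLE = [
--     ('0', '[BTN_0]'), ('1', '[BTN_1]'), ('2', '[BTN_2]'), ('3', '[BTN_3]'),
--     ('4', '[BTN_4]'), ('5', '[BTN_5]'), ('6', '[BTN_6]'), ('7', '[BTN_7]'),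
--     ('8', '[BTN_8]'), ('9', '[BTN_9]'),
--     ('back', '[BTN_BACK]'),
--     ('ch+', '[BTN_CH_UP]'), ('ch-', '[BTN_CH_DOWN]'),
--     ('channel down', '[BTN_CH_DOWN]'), ('channel up', '[BTN_CH_UP]'),
--     ('enter', '[BTN_ENTER]'),
--     ('menu', '[BTN_MENU]'), ('mute', '[BTN_MUTE]'),
--     ('power', '[BTN_POWER]'), ('power button', '[BTN_POWER]'), ('pwr', '[BTN_POWER]'),
--     ('vol+', '[BTN_VOL_UP]'), ('vol-', '[BTN_VOL_DOWN]'),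
--     ('vol_dn', '[BTN_VOL_DOWN]'), ('vol_up', '[BTN_VOL_UP]'),
--     ('volume down', '[BTN_VOL_DOWN]'), ('volume up', '[BTN_VOL_UP]'),
-- ]
--
-- def _bsearch(table, key):
--     if not table:
--         return None
--     mid = len(table) // 2
--     k, v = table[mid]
--     if key == k:
--         return v
--     if key < k:
--         return _bsearch(table[:mid], key)
--     return _bsearch(table[mid + 1:], key)
--
-- def normalize_button(name):
--     return _bsearch(_TABLE, name.strip().lower())
-- ===== Notes on version B (the rewrite author's own statement) =====
-- stated objective: alternative
-- what changed: A's sequential if-chain of list-membership tests (digits regenerated per call) is replaced by a recursive binary search over one alias-to-token table kept sorted by key, a divide-and-conquer lookup instead of a linear scan of branches.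
import Mathlib
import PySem

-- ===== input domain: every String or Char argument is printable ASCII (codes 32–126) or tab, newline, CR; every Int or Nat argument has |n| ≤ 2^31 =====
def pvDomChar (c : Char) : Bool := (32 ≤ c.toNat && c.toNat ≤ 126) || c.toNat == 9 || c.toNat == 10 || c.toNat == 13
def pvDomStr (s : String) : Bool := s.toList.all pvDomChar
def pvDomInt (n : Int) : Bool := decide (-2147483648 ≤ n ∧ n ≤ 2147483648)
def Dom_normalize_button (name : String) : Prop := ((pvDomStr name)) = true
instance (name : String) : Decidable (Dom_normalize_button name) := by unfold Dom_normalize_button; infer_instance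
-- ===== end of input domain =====

-- B replaces A's sequential if-chain of list-membership tests by a recursive binary
-- search over one alias→token table sorted by key (digits included), a different
-- lookup algorithm of similar cost on this small table ("alternative", no speed claim).

-- ===== PORT A =====
def normalize_button (name : String) : Option String :=
  let n := PySem.Str.lower (PySem.Str.strip name)
  if ["power", "pwr", "power button"].contains n then some "[BTN_POWER]"
  else if ["vol+", "volume up", "vol_up"].contains n then some "[BTN_VOL_UP]"
  else if ["vol-", "volume down", "vol_dn"].contains n then some "[BTN_VOL_DOWN]"
  else if n = "mute" then some "[BTN_MUTE]"
  else if ["ch+", "channel up"].contains n then some "[BTN_CH_UP]"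
  else if ["ch-", "channel down"].contains n then some "[BTN_CH_DOWN]"
  else if n = "menu" then some "[BTN_MENU]"
  else if n = "enter" then some "[BTN_ENTER]"
  else if n = "back" then some "[BTN_BACK]"
  else if ((PySem.List.pyRange 0 10 1).map PySem.Int.toStr).contains n then
    some ("[BTN_" ++ n ++ "]")
  else none

-- ===== PORT B =====
-- _TABLE: keys in ascending ASCII order (written sorted in Source B, digits included)
def pvTable : List (String × String) :=
  [("0", "[BTN_0]"), ("1", "[BTN_1]"), ("2", "[BTN_2]"), ("3", "[BTN_3]"),
   ("4", "[BTN_4]"), ("5", "[BTN_5]"), ("6", "[BTN_6]"), ("7", "[BTN_7]"),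
   ("8", "[BTN_8]"), ("9", "[BTN_9]"),
   ("back", "[BTN_BACK]"),
   ("ch+", "[BTN_CH_UP]"), ("ch-", "[BTN_CH_DOWN]"),
   ("channel down", "[BTN_CH_DOWN]"), ("channel up", "[BTN_CH_UP]"),
   ("enter", "[BTN_ENTER]"),
   ("menu", "[BTN_MENU]"), ("mute", "[BTN_MUTE]"),
   ("power", "[BTN_POWER]"), ("power button", "[BTN_POWER]"), ("pwr", "[BTN_POWER]"),
   ("vol+", "[BTN_VOL_UP]"), ("vol-", "[BTN_VOL_DOWN]"),
   ("vol_dn", "[BTN_VOL_DOWN]"), ("vol_up", "[BTN_VOL_UP]"),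
   ("volume down", "[BTN_VOL_DOWN]"), ("volume up", "[BTN_VOL_UP]")]

-- _bsearch: table[mid] with 0 ≤ mid < len is exactly l[mid]? (always some here; the
-- none arm is only a totality guard); table[:mid] / table[mid+1:] with in-range
-- nonnegative bounds are exactly List.take mid / List.drop (mid+1); Python's '<' on
-- str is '<' on .toList (code-point lexicographic; see PYSEM str COMPARISON).
def pvBsearch (l : List (String × String)) (k : String) : Option String :=
  match l with
  | [] => none
  | a :: as =>
    let m := (a :: as).length / 2
    match (a :: as)[m]? with
    | none => none
    | some p =>
      if k = p.1 then some p.2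
      else if k.toList < p.1.toList then pvBsearch ((a :: as).take m) k
      else pvBsearch ((a :: as).drop (m + 1)) k
termination_by l.length
decreasing_by
  all_goals simp [List.length_take]
  omega

def normalize_button_alt (name : String) : Option String :=
  pvBsearch pvTable (PySem.Str.lower (PySem.Str.strip name))

-- ===== PRECONDITION & SPEC =====
def Spec_normalize_button (name : String) (out : Option String) : Prop := out = normalize_button_alt name
instance (name : String) (out : Option String) : Decidable (Spec_normalize_button name out) := by unfold Spec_normalize_button; infer_instance

-- ===== CLAIM (what is proved, stated in full; the proofs are below) =====
def Claim_equal_normalize_button : Prop := ∀ (name : String), Dom_normalize_button name → Spec_normalize_button name (normalize_button name)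

-- ===== LEMMAS AND PROOFS =====

-- binary search on a key-sorted list computes the first (unique) key match
theorem pvBsearch_eq_find_aux (n : Nat) :
    ∀ (l : List (String × String)), l.length ≤ n →
      l.Pairwise (fun a b => a.1.toList < b.1.toList) →
      ∀ (k : String), pvBsearch l k = (l.find? (fun p => p.1 == k)).map Prod.snd := by
  induction n with
  | zero =>
    intro l hl _ k
    have : l = [] := List.eq_nil_of_length_eq_zero (Nat.le_zero.mp hl)
    subst this; simp [pvBsearch]
  | succ n ih =>
    intro l hl hs k
    match l with
    | [] => simp [pvBsearch]
    | a :: as =>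
      set l := a :: as with hldef
      set m := l.length / 2 with hm
      have hmlt : m < l.length := by simp [hldef, hm]; omega
      set p := l[m] with hp
      -- split the table around the probed element
      have hsplit : l = l.take m ++ p :: l.drop (m + 1) := by
        conv_lhs => rw [← List.take_append_drop m l]
        rw [List.drop_eq_getElem_cons hmlt]
      have hpair := hsplit ▸ hs
      rw [List.pairwise_append] at hpair
      obtain ⟨htake, hdrop, hcross⟩ := hpair
      have hpmem : p ∈ p :: l.drop (m + 1) := List.mem_cons_self ..
      have hdrop' : ∀ y ∈ l.drop (m + 1), p.1.toList < y.1.toList :=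
        (List.pairwise_cons.mp hdrop).1
      have hfind : l.find? (fun q => q.1 == k)
          = ((l.take m).find? (fun q => q.1 == k)).or
            ((p :: l.drop (m + 1)).find? (fun q => q.1 == k)) := by
        conv_lhs => rw [hsplit]
        exact List.find?_append
      -- reduce one step of pvBsearch
      rw [show pvBsearch l k
            = (if k = p.1 then some p.2
               else if k.toList < p.1.toList then pvBsearch (l.take m) k
               else pvBsearch (l.drop (m + 1)) k) by
        conv_lhs => rw [hldef, pvBsearch]
        simp only [← hldef, ← hm, List.getElem?_eq_getElem hmlt, ← hp]]
      by_cases hk : k = p.1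
      · have h1 : (l.take m).find? (fun q => q.1 == k) = none := by
          rw [List.find?_eq_none]
          intro x hx
          have := hcross x hx p hpmem
          simp only [beq_iff_eq]
          exact fun h => absurd (congrArg String.toList (h.trans hk)) (ne_of_lt this)
        have hpk : (p.1 == k) = true := beq_iff_eq.mpr hk.symm
        rw [if_pos hk, hfind, h1, Option.none_or]
        simp [List.find?, hpk]
      · have hkne : k.toList ≠ p.1.toList := fun h => hk (String.toList_inj.mp h)
        by_cases hlt : k.toList < p.1.toList
        · -- search the left half; everything from the pivot on is larger than k
          have h2 : (p :: l.drop (m + 1)).find? (fun q => q.1 == k) = none := by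
            rw [List.find?_eq_none]
            intro y hy
            rcases List.mem_cons.mp hy with rfl | hy'
            · simp [beq_iff_eq]; exact fun h => hk h.symm
            · have := lt_trans hlt (hdrop' y hy')
              simp [beq_iff_eq]
              exact fun h => absurd (congrArg String.toList h.symm) (ne_of_lt this)
          have hlen : (l.take m).length ≤ n := by
            simp [List.length_take]
            have : l.length ≤ n + 1 := hl
            omega
          simp only [hk, hlt, if_false, if_true, hfind, h2, Option.or_none]
          exact ih (l.take m) hlen htake k
        · -- search the right half; everything up to the pivot is smaller than k
          have hgt : p.1.toList < k.toList := by
            rcases lt_trichotomy k.toList p.1.toList with h | h | h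
            · exact absurd h hlt
            · exact absurd h hkne
            · exact h
          have h1 : (l.take m).find? (fun q => q.1 == k) = none := by
            rw [List.find?_eq_none]
            intro x hx
            have := lt_trans (hcross x hx p hpmem) hgt
            simp [beq_iff_eq]
            exact fun h => absurd (congrArg String.toList h) (ne_of_lt this)
          have hpk : (p.1 == k) = false := by
            simp; exact fun h => hk h.symm
          have hlen : (l.drop (m + 1)).length ≤ n := by
            simp
            have : l.length ≤ n + 1 := hl
            have : 0 < l.length := by simp [hldef]
            omega
          simp only [hk, hlt, if_false, hfind, h1, Option.none_or, List.find?_cons, hpk]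
          exact ih (l.drop (m + 1)) hlen (List.pairwise_cons.mp hdrop).2 k
      
theorem pvTable_sorted : pvTable.Pairwise (fun a b => a.1.toList < b.1.toList) := by decide

-- A's if-chain equals first-match lookup in the table, for every key n
set_option maxHeartbeats 1000000 in
theorem pvChain_eq_find (n : String) :
    (if ["power", "pwr", "power button"].contains n then some "[BTN_POWER]"
     else if ["vol+", "volume up", "vol_up"].contains n then some "[BTN_VOL_UP]"
     else if ["vol-", "volume down", "vol_dn"].contains n then some "[BTN_VOL_DOWN]"
     else if n = "mute" then some "[BTN_MUTE]"
     else if ["ch+", "channel up"].contains n then some "[BTN_CH_UP]"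
     else if ["ch-", "channel down"].contains n then some "[BTN_CH_DOWN]"
     else if n = "menu" then some "[BTN_MENU]"
     else if n = "enter" then some "[BTN_ENTER]"
     else if n = "back" then some "[BTN_BACK]"
     else if ((PySem.List.pyRange 0 10 1).map PySem.Int.toStr).contains n then
       some ("[BTN_" ++ n ++ "]")
     else none) = (pvTable.find? (fun p => p.1 == n)).map Prod.snd := by
  by_cases hm : n ∈ ["power", "pwr", "power button", "vol+", "volume up", "vol_up", "vol-", "volume down", "vol_dn", "mute", "ch+", "channel up", "ch-", "channel down", "menu", "enter", "back", "0", "1", "2", "3", "4", "5", "6", "7", "8", "9"]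
  · simp only [List.mem_cons, List.not_mem_nil, or_false] at hm
    rcases hm with rfl|rfl|rfl|rfl|rfl|rfl|rfl|rfl|rfl|rfl|rfl|rfl|rfl|rfl|rfl|rfl|rfl|rfl|rfl|rfl|rfl|rfl|rfl|rfl|rfl|rfl|rfl <;> decide
  · simp only [List.mem_cons, List.not_mem_nil, or_false] at hm
    push Not at hm
    obtain ⟨h1, h2, h3, h4, h5, h6, h7, h8, h9, h10, h11, h12, h13, h14, h15, h16, h17, h18, h19, h20, h21, h22, h23, h24, h25, h26, h27⟩ := hm
    have hnone : pvTable.find? (fun p => p.1 == n) = none := by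
      rw [List.find?_eq_none]
      intro p hp
      simp only [pvTable, List.mem_cons, List.not_mem_nil, or_false] at hp
      rcases hp with rfl|rfl|rfl|rfl|rfl|rfl|rfl|rfl|rfl|rfl|rfl|rfl|rfl|rfl|rfl|rfl|rfl|rfl|rfl|rfl|rfl|rfl|rfl|rfl|rfl|rfl|rfl <;>
        simp only [beq_iff_eq] <;>
        first | exact Ne.symm h1 | exact Ne.symm h2 | exact Ne.symm h3 | exact Ne.symm h4 | exact Ne.symm h5 | exact Ne.symm h6 | exact Ne.symm h7 | exact Ne.symm h8 | exact Ne.symm h9 | exact Ne.symm h10 | exact Ne.symm h11 | exact Ne.symm h12 | exact Ne.symm h13 | exact Ne.symm h14 | exact Ne.symm h15 | exact Ne.symm h16 | exact Ne.symm h17 | exact Ne.symm h18 | exact Ne.symm h19 | exact Ne.symm h20 | exact Ne.symm h21 | exact Ne.symm h22 | exact Ne.symm h23 | exact Ne.symm h24 | exact Ne.symm h25 | exact Ne.symm h26 | exact Ne.symm h27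
    rw [hnone]
    simp [show ((PySem.List.pyRange 0 10 1).map PySem.Int.toStr) = ["0","1","2","3","4","5","6","7","8","9"] from rfl,
      h1, h2, h3, h4, h5, h6, h7, h8, h9, h10, h11, h12, h13, h14, h15, h16, h17, h18, h19, h20, h21, h22, h23, h24, h25, h26, h27]

-- ===== VERDICT (by name: the statement is the Claim_ definition above) =====
theorem normalize_button_spec : Claim_equal_normalize_button := by
  intro name _
  unfold Spec_normalize_button normalize_button normalize_button_alt
  rw [pvBsearch_eq_find_aux pvTable.length pvTable le_rfl pvTable_sorted]
  exact pvChain_eq_find (PySem.Str.lower (PySem.Str.strip name))
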